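-- pv_equiv track=rewrite | github.com/mobeen786822/job-application-assistant | tools/resume_bot.py | _all_words_within_window
-- ===== SOURCE A (Python) =====
-- def _all_words_within_window(skill_norm: str, jd_tokens: list[str], window_size: int = 6) -> bool:
--     words = [w for w in skill_norm.split(' ') if w]
--     if not words or not jd_tokens:
--         return False
--     if len(words) == 1:
--         return words[0] in set(jd_tokens)
--
--     target = set(words)
--     span = max(window_size, len(words))
--     for start in range(len(jd_tokens)):
--         end = min(len(jd_tokens), start + span)
--         if target.issubset(set(jd_tokens[start:end])):
--             return True
--     return False
-- ===== SOURCE B (Python) =====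
-- def _aw_enter(target, counts, have, tok):
--     """Token tok slides into the window: bump its count, track newly-present target words."""
--     if tok in target:
--         c = counts.get(tok, 0) + 1
--         counts[tok] = c
--         if c == 1:
--             have += 1
--     return counts, have
--
--
-- def _aw_leave(target, counts, have, old):
--     """Token old slides out of the window: drop its count, track disappearing target words."""
--     if old in target:
--         c = counts[old] - 1
--         counts[old] = c
--         if c == 0:
--             have -= 1
--     return counts, have
--
--
-- def _all_words_within_window(skill_norm: str, jd_tokens: list[str], window_size: int = 6) -> bool:
--     words = [w for w in skill_norm.split(' ') if w]
--     if not words or not jd_tokens: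
--         return False
--     if len(words) == 1:
--         return words[0] in set(jd_tokens)
--
--     target = set(words)
--     need = len(target)
--     span = max(window_size, len(words))
--     w = min(span, len(jd_tokens))
--     counts = {}
--     have = 0
--     for i, tok in enumerate(jd_tokens):
--         counts, have = _aw_enter(target, counts, have, tok)
--         if i >= w:
--             counts, have = _aw_leave(target, counts, have, jd_tokens[i - w])
--         if i >= w - 1 and have == need:
--             return True
--     return False
-- ===== Notes on version B (the rewrite author's own statement) =====
-- stated objective: alternative
-- what changed: A rebuilds a set of up to span tokens for every start position and tests subset inclusion against it; B makes a single sliding-window pass keeping a dict of in-window counts of the target words plus a count of distinct target words currently present, updated incrementally as one token enters and one leaves the window.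
import Mathlib
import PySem

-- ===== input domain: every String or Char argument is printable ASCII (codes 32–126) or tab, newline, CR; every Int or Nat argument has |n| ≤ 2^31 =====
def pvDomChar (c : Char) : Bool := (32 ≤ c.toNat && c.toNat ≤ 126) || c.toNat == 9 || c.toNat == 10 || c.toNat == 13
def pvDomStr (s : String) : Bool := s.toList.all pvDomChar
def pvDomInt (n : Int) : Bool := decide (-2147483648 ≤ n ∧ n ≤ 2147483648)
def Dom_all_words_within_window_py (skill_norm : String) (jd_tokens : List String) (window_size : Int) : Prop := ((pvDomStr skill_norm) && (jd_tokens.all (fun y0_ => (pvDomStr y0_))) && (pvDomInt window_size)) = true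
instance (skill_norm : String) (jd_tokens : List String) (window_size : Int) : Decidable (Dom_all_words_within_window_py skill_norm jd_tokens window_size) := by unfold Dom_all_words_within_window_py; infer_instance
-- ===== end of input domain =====

-- B replaces A's per-start rebuild of a window set by one sliding-window pass that keeps
-- a dict of in-window counts of the target words (objective: alternative algorithm).

-- ===== PORT A =====
def all_words_within_window_py (skill_norm : String) (jd_tokens : List String) (window_size : Int) : Bool :=
  -- skill_norm.split(' '): the separator is the nonempty literal " ", so split? is some
  let words := ((PySem.Str.split? skill_norm " ").getD []).filter (fun w => !(w == ""))
  if words.isEmpty || jd_tokens.isEmpty then false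
  else if words.length == 1 then
    PySem.Set.contains (PySem.Set.ofList jd_tokens) (PySem.List.pyGetD words 0 "")
  else
    let target := PySem.Set.ofList words
    let span : Int := max window_size (PySem.List.len words)
    -- 'for start in range(len(jd_tokens)): … return True / return False' as .any
    (PySem.List.pyRange 0 (PySem.List.len jd_tokens) 1).any (fun start =>
      let e := min (PySem.List.len jd_tokens) (start + span)
      PySem.Set.issubset target (PySem.Set.ofList (PySem.List.slice jd_tokens (some start) (some e))))

-- ===== PORT B =====
-- Source B's _aw_enter: tok slides into the window
def awEnter (target : PySem.Set String) (counts : PySem.Dict String Int) (haveC : Int)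
    (tok : String) : PySem.Dict String Int × Int :=
  if PySem.Set.contains target tok then
    let c := counts.getD tok 0 + 1
    (counts.insert tok c, if c == 1 then haveC + 1 else haveC)
  else (counts, haveC)

-- Source B's _aw_leave: old slides out of the window (counts[old]: old was counted in, so the
-- key is present and Python raises no KeyError; getD is exact there)
def awLeave (target : PySem.Set String) (counts : PySem.Dict String Int) (haveC : Int)
    (old : String) : PySem.Dict String Int × Int :=
  if PySem.Set.contains target old then
    let c := counts.getD old 0 - 1
    (counts.insert old c, if c == 0 then haveC - 1 else haveC)
  else (counts, haveC)

-- the 'for i, tok in enumerate(jd_tokens)' loop of Source B, with early return, as structural recursion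
def awLoop (jd : List String) (target : PySem.Set String) (need w : Int) :
    List (Int × String) → PySem.Dict String Int → Int → Bool
  | [], _, _ => false
  | (i, tok) :: rest, counts, haveC =>
    let st1 := awEnter target counts haveC tok
    -- jd_tokens[i - w]: under the guard w ≤ i we have 0 ≤ i - w < len jd, so pyGetD is exact
    let st2 := if w ≤ i then awLeave target st1.1 st1.2 (PySem.List.pyGetD jd (i - w) "") else st1
    if (w - 1 ≤ i) && (st2.2 == need) then true
    else awLoop jd target need w rest st2.1 st2.2

def all_words_within_window_py_alt (skill_norm : String) (jd_tokens : List String) (window_size : Int) : Bool :=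
  let words := ((PySem.Str.split? skill_norm " ").getD []).filter (fun w => !(w == ""))
  if words.isEmpty || jd_tokens.isEmpty then false
  else if words.length == 1 then
    PySem.Set.contains (PySem.Set.ofList jd_tokens) (PySem.List.pyGetD words 0 "")
  else
    let target := PySem.Set.ofList words
    let need := PySem.Set.len target
    let span : Int := max window_size (PySem.List.len words)
    let w : Int := min span (PySem.List.len jd_tokens)
    awLoop jd_tokens target need w (PySem.List.enumerate jd_tokens 0) PySem.Dict.empty 0

-- ===== PRECONDITION & SPEC =====
def Spec_all_words_within_window_py (skill_norm : String) (jd_tokens : List String) (window_size : Int) (out : Bool) : Prop := out = all_words_within_window_py_alt skill_norm jd_tokens window_size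
instance (skill_norm : String) (jd_tokens : List String) (window_size : Int) (out : Bool) : Decidable (Spec_all_words_within_window_py skill_norm jd_tokens window_size out) := by unfold Spec_all_words_within_window_py; infer_instance

-- ===== CLAIM (what is proved, stated in full; the proofs are below) =====
def Claim_equal_all_words_within_window_py : Prop := ∀ (skill_norm : String) (jd_tokens : List String) (window_size : Int), Dom_all_words_within_window_py skill_norm jd_tokens window_size → Spec_all_words_within_window_py skill_norm jd_tokens window_size (all_words_within_window_py skill_norm jd_tokens window_size)

-- ===== LEMMAS AND PROOFS =====

-- the window of the last W tokens among the first k+1 tokens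
def pvWinEnd (jd : List String) (W k : Nat) : List String := (jd.take (k+1)).drop (k+1-W)

-- membership in a drop-take segment, as an index statement
lemma pv_mem_drop_take {α : Type} (xs : List α) (a m : Nat) (t : α) :
    t ∈ (xs.drop a).take m ↔ ∃ j : Nat, a ≤ j ∧ j < a + m ∧ ∃ h : j < xs.length, xs[j] = t := by
  rw [List.mem_iff_getElem]
  constructor
  · rintro ⟨i, hi, rfl⟩
    have hlen : i < m ∧ a + i < xs.length := by
      simp [List.length_take, List.length_drop] at hi; omega
    refine ⟨a + i, by omega, by omega, by omega, ?_⟩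
    simp [List.getElem_take, List.getElem_drop]
  · rintro ⟨j, h1, h2, hlt, rfl⟩
    refine ⟨j - a, ?_, ?_⟩
    · simp [List.length_take, List.length_drop]; omega
    · simp [List.getElem_take, List.getElem_drop]
      congr 1; omega

lemma pv_mem_winEnd (jd : List String) (W k : Nat) (t : String) :
    t ∈ pvWinEnd jd W k ↔ ∃ j : Nat, k+1-W ≤ j ∧ j < k+1 ∧ ∃ h : j < jd.length, jd[j] = t := by
  unfold pvWinEnd
  rw [List.drop_take, pv_mem_drop_take]
  constructor
  · rintro ⟨j, h1, h2, h3, rfl⟩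
    exact ⟨j, h1, by omega, h3, rfl⟩
  · rintro ⟨j, h1, h2, h3, rfl⟩
    exact ⟨j, h1, by omega, h3, rfl⟩

-- how many distinct target words are present, after one element joins the pool
lemma pv_countP_or (target u : List String) (x : String) (hnd : target.Nodup) :
    target.countP (fun t => decide (t = x ∨ t ∈ u))
      = target.countP (fun t => decide (t ∈ u)) + (if x ∈ target ∧ x ∉ u then 1 else 0) := by
  induction target with
  | nil => simp
  | cons a ts ih =>
    have hnd' : ts.Nodup := hnd.of_cons
    have hax : a ∉ ts := (List.nodup_cons.mp hnd).1
    rw [List.countP_cons, List.countP_cons, ih hnd']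
    by_cases hxa : a = x
    · subst hxa
      by_cases hu : a ∈ u <;> simp [hu, hax]
    · have h1 : (decide (a = x ∨ a ∈ u)) = decide (a ∈ u) := by simp [hxa]
      rw [h1]
      by_cases hxt : x ∈ ts <;> by_cases hu : x ∈ u <;>
        simp [hxt, hu, Ne.symm hxa] <;> omega

lemma pv_countP_snoc (target u : List String) (x : String) (hnd : target.Nodup) :
    target.countP (fun t => decide (t ∈ u ++ [x]))
      = target.countP (fun t => decide (t ∈ u)) + (if x ∈ target ∧ x ∉ u then 1 else 0) := by
  rw [← pv_countP_or target u x hnd]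
  apply List.countP_congr
  intro a _
  simp [List.mem_append, or_comm]

lemma pv_countP_cons (target u : List String) (x : String) (hnd : target.Nodup) :
    target.countP (fun t => decide (t ∈ x :: u))
      = target.countP (fun t => decide (t ∈ u)) + (if x ∈ target ∧ x ∉ u then 1 else 0) := by
  rw [← pv_countP_or target u x hnd]
  apply List.countP_congr
  intro a _
  simp [List.mem_cons]

-- awEnter preserves the window invariant: counts holds in-window counts of target words,
-- haveC the number of distinct target words present
lemma pv_step_add (target : List String) (hnd : target.Nodup) (u0 : List String)
    (counts : PySem.Dict String Int) (haveC : Int) (tok : String)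
    (h1 : ∀ t ∈ target, counts.getD t 0 = (u0.count t : Int))
    (h2 : haveC = (target.countP (fun t => decide (t ∈ u0)) : Int)) :
    (∀ t ∈ target, (awEnter target counts haveC tok).1.getD t 0 = ((u0 ++ [tok]).count t : Int)) ∧
    (awEnter target counts haveC tok).2
      = (target.countP (fun t => decide (t ∈ u0 ++ [tok])) : Int) := by
  unfold awEnter
  by_cases htok : tok ∈ target
  · have hc : PySem.Set.contains target tok = true := (PySem.Set.contains_iff _ _).mpr htok
    rw [hc]
    simp only [if_true]
    constructor
    · intro t ht
      rw [PySem.Dict.getD_insert]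
      by_cases hte : t = tok
      · subst hte
        rw [if_pos rfl, h1 t ht]
        simp [List.count_append]
      · rw [if_neg hte, h1 t ht]
        have : tok ≠ t := fun h => hte h.symm
        simp [List.count_append, this]
    · rw [pv_countP_snoc target u0 tok hnd, h1 tok htok, h2]
      by_cases hmem : tok ∈ u0
      · have : ¬ ((u0.count tok : Int) + 1 == 1) = true := by
          simp only [beq_iff_eq]
          have := List.count_pos_iff.mpr hmem
          omega
        simp only [Bool.not_eq_true] at this
        rw [this]
        simp [htok, hmem]
      · have h0 : u0.count tok = 0 := List.count_eq_zero.mpr hmem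
        rw [h0]
        simp [htok, hmem]
  · have hc : PySem.Set.contains target tok = false := by
      rw [← Bool.not_eq_true, PySem.Set.contains_iff]; exact htok
    rw [hc]
    simp only [Bool.false_eq_true, if_false]
    constructor
    · intro t ht
      rw [h1 t ht]
      have : tok ≠ t := fun h => htok (h ▸ ht)
      simp [List.count_append, this]
    · rw [pv_countP_snoc target u0 tok hnd, h2]
      simp [htok]

-- awLeave preserves the window invariant when the head of the window slides out
lemma pv_step_rem (target : List String) (hnd : target.Nodup) (mid : List String)
    (counts1 : PySem.Dict String Int) (have1 : Int) (old : String)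
    (h1 : ∀ t ∈ target, counts1.getD t 0 = ((old :: mid).count t : Int))
    (h2 : have1 = (target.countP (fun t => decide (t ∈ old :: mid)) : Int)) :
    (∀ t ∈ target, (awLeave target counts1 have1 old).1.getD t 0 = (mid.count t : Int)) ∧
    (awLeave target counts1 have1 old).2
      = (target.countP (fun t => decide (t ∈ mid)) : Int) := by
  unfold awLeave
  by_cases hold : old ∈ target
  · have hc : PySem.Set.contains target old = true := (PySem.Set.contains_iff _ _).mpr hold
    rw [hc]
    simp only [if_true]
    have hcnt : counts1.getD old 0 - 1 = (mid.count old : Int) := by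
      rw [h1 old hold]; simp [List.count_cons_self]
    constructor
    · intro t ht
      rw [PySem.Dict.getD_insert]
      by_cases hte : t = old
      · subst hte; rw [if_pos rfl]; exact hcnt
      · rw [if_neg hte, h1 t ht]
        have : old ≠ t := fun h => hte h.symm
        simp [this]
    · rw [pv_countP_cons target mid old hnd] at h2
      rw [hcnt, h2]
      by_cases hmem : old ∈ mid
      · have : ¬ ((mid.count old : Int) == 0) = true := by
          simp only [beq_iff_eq]
          have := List.count_pos_iff.mpr hmem
          omega
        simp only [Bool.not_eq_true] at this
        rw [this]
        simp [hold, hmem]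
      · have h0 : mid.count old = 0 := List.count_eq_zero.mpr hmem
        rw [h0]
        simp [hold, hmem]
  · have hc : PySem.Set.contains target old = false := by
      rw [← Bool.not_eq_true, PySem.Set.contains_iff]; exact hold
    rw [hc]
    simp only [Bool.false_eq_true, if_false]
    constructor
    · intro t ht
      rw [h1 t ht]
      have : old ≠ t := fun h => hold (h ▸ ht)
      simp [this]
    · rw [pv_countP_cons target mid old hnd] at h2
      rw [h2]
      simp [hold]

-- A's scan over all (possibly truncated) windows ↔ some full window of width W covers target
lemma pv_anyA_iff (jd target : List String) (span : Int) (hspan : 1 ≤ span) :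
    ((PySem.List.pyRange 0 (PySem.List.len jd) 1).any (fun start =>
        PySem.Set.issubset target (PySem.Set.ofList
          (PySem.List.slice jd (some start) (some (min (PySem.List.len jd) (start + span)))))) = true)
    ↔ ∃ k : Nat, k < jd.length ∧ (min span (PySem.List.len jd)).toNat ≤ k + 1 ∧
        ∀ t ∈ target, t ∈ pvWinEnd jd ((min span (PySem.List.len jd)).toNat) k := by
  have hn : PySem.List.len jd = (jd.length : Int) := PySem.List.len_eq jd
  rw [List.any_eq_true]
  constructor
  · rintro ⟨start, hmem, hsub⟩
    rw [PySem.List.mem_pyRange_one] at hmem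
    obtain ⟨h0, hlt⟩ := hmem
    rw [hn] at hlt
    set s : Nat := start.toNat with hs
    rw [PySem.Set.issubset_iff] at hsub
    rw [PySem.List.slice_toNat jd h0 (by rw [hn]; omega)] at hsub
    have hsn : s < jd.length := by omega
    set e : Nat := (min (PySem.List.len jd) (start + span)).toNat with he
    have hes : e = min jd.length (s + span.toNat) := by rw [hn] at he; omega
    refine ⟨e - 1, by omega, by rw [hn]; omega, ?_⟩
    intro t ht
    have := hsub t ht
    rw [PySem.Set.mem_ofList, pv_mem_drop_take] at this
    obtain ⟨j, h1, h2, h3, rfl⟩ := this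
    rw [pv_mem_winEnd]
    exact ⟨j, by omega, by omega, h3, rfl⟩
  · rintro ⟨k, hk, hWk, hcov⟩
    set W : Nat := (min span (PySem.List.len jd)).toNat with hW
    refine ⟨((k+1-W : Nat) : Int), ?_, ?_⟩
    · rw [PySem.List.mem_pyRange_one, hn]; omega
    · rw [PySem.Set.issubset_iff]
      intro t ht
      have := hcov t ht
      rw [pv_mem_winEnd] at this
      obtain ⟨j, h1, h2, h3, rfl⟩ := this
      rw [PySem.Set.mem_ofList]
      rw [PySem.List.slice_toNat jd (by omega) (by rw [hn]; omega)]
      rw [pv_mem_drop_take]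
      exact ⟨j, by omega, by omega, h3, rfl⟩

-- B's sliding-window loop ↔ some full window of width W covers target
lemma pv_awLoop_iff (jd target : List String) (hnd : target.Nodup) (W : Nat) (hW : 1 ≤ W) :
    ∀ (suf pre : List String) (counts : PySem.Dict String Int) (haveC : Int),
      jd = pre ++ suf →
      (∀ t ∈ target, counts.getD t 0 = ((pre.drop (pre.length - W)).count t : Int)) →
      haveC = (target.countP (fun t => decide (t ∈ pre.drop (pre.length - W))) : Int) →
      (awLoop jd target (target.length : Int) (W : Int)
          (PySem.List.enumerate suf (pre.length : Int)) counts haveC = true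
        ↔ ∃ k : Nat, pre.length ≤ k ∧ k < jd.length ∧ W ≤ k + 1 ∧
            ∀ t ∈ target, t ∈ pvWinEnd jd W k) := by
  intro suf
  induction suf with
  | nil =>
    intro pre counts haveC hjd _ _
    have hlen : jd.length = pre.length := by rw [hjd]; simp
    simp only [PySem.List.enumerate_nil, awLoop]
    constructor
    · intro h; exact Bool.noConfusion h
    · rintro ⟨k, h1, h2, _⟩; omega
  | cons tok rest ih =>
    intro pre counts haveC hjd hinv1 hinv2
    have hklen : pre.length < jd.length := by rw [hjd]; simp
    set k := pre.length with hkdef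
    set pre' : List String := pre ++ [tok] with hpre'
    have hjd' : jd = pre' ++ rest := by rw [hjd, hpre']; simp
    have hlenpre' : pre'.length = k + 1 := by rw [hpre']; simp [hkdef]
    have htake : jd.take (k+1) = pre' := by
      rw [hjd, hpre', hkdef, List.take_append]
      simp
    have hwin : pvWinEnd jd W k = pre'.drop (k+1-W) := by
      unfold pvWinEnd; rw [htake]
    rw [PySem.List.enumerate_cons]
    simp only [awLoop]
    obtain ⟨hA1, hA2⟩ := pv_step_add target hnd (pre.drop (k - W)) counts haveC tok hinv1 hinv2
    by_cases hkW : W ≤ k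
    · -- the window is full: jd_tokens[k - W] slides out
      have hiW : ((W:Int) ≤ (k:Int)) := by omega
      rw [if_pos hiW]
      have hcast : (k:Int) - (W:Int) = ((k-W : Nat) : Int) := by omega
      have hkWl : k - W < pre.length := by omega
      have hold_eq : PySem.List.pyGetD jd ((k:Int) - (W:Int)) "" = pre[k-W]'hkWl := by
        rw [hcast, PySem.List.pyGetD_natCast, List.getD_eq_getElem jd "" (by omega)]
        simp only [hjd]
        exact List.getElem_append_left hkWl
      rw [hold_eq]
      set old := pre[k-W]'hkWl with holddef
      have hu0 : pre.drop (k - W) = old :: pre.drop (k - W + 1) := List.drop_eq_getElem_cons hkWl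
      have hmid : pre'.drop (k+1-W) = pre.drop (k - W + 1) ++ [tok] := by
        rw [hpre', List.drop_append_of_le_length (by omega), show k+1-W = k-W+1 by omega]
      have hu1 : pre.drop (k - W) ++ [tok] = old :: (pre.drop (k - W + 1) ++ [tok]) := by
        rw [hu0]; rfl
      rw [hu1] at hA1 hA2
      obtain ⟨hB1, hB2⟩ := pv_step_rem target hnd (pre.drop (k-W+1) ++ [tok])
        (awEnter target counts haveC tok).1 (awEnter target counts haveC tok).2 old hA1 hA2
      have hcond : (decide ((W:Int) - 1 ≤ (k:Int)) &&
          ((awLeave target (awEnter target counts haveC tok).1 (awEnter target counts haveC tok).2 old).2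
            == (target.length : Int))) = true
          ↔ (W ≤ k + 1 ∧ ∀ t ∈ target, t ∈ pvWinEnd jd W k) := by
        rw [Bool.and_eq_true, decide_eq_true_iff, beq_iff_eq, hB2, hwin, hmid]
        rw [show ((target.countP (fun t => decide (t ∈ pre.drop (k-W+1) ++ [tok])) : Int)
              = (target.length : Int)) ↔
            (target.countP (fun t => decide (t ∈ pre.drop (k-W+1) ++ [tok])) = target.length)
          from Nat.cast_inj]
        rw [List.countP_eq_length]
        constructor
        · rintro ⟨_, h⟩
          exact ⟨by omega, fun t ht => of_decide_eq_true (h t ht)⟩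
        · rintro ⟨_, h⟩
          exact ⟨by omega, fun t ht => decide_eq_true (h t ht)⟩
      by_cases hC : W ≤ k + 1 ∧ ∀ t ∈ target, t ∈ pvWinEnd jd W k
      · rw [if_pos (hcond.mpr hC)]
        simp only [true_iff]
        exact ⟨k, le_refl k, hklen, hC.1, hC.2⟩
      · rw [if_neg (fun h => hC (hcond.mp h))]
        have henum : ((k:Int) + 1) = ((pre'.length : Nat) : Int) := by rw [hlenpre']; push_cast; ring
        rw [henum]
        rw [ih pre' (awLeave target (awEnter target counts haveC tok).1 (awEnter target counts haveC tok).2 old).1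
            (awLeave target (awEnter target counts haveC tok).1 (awEnter target counts haveC tok).2 old).2 hjd'
          (by intro t ht; rw [hlenpre', hmid]; exact hB1 t ht)
          (by rw [hlenpre', hmid]; exact hB2)]
        constructor
        · rintro ⟨k', h1, h2⟩
          exact ⟨k', by omega, h2⟩
        · rintro ⟨k', h1, h2, h3, h4⟩
          by_cases hek : k' = k
          · subst hek; exact absurd ⟨h3, h4⟩ hC
          · exact ⟨k', by omega, h2, h3, h4⟩
    · -- the window is still growing: nothing slides out
      have hiW : ¬ ((W:Int) ≤ (k:Int)) := by omega
      rw [if_neg hiW]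
      have hmid : pre.drop (k - W) ++ [tok] = pre'.drop (k+1-W) := by
        rw [show k-W = 0 by omega, show k+1-W = 0 by omega, List.drop_zero, List.drop_zero, hpre']
      rw [hmid] at hA1 hA2
      have hcond : (decide ((W:Int) - 1 ≤ (k:Int)) &&
          ((awEnter target counts haveC tok).2 == (target.length : Int))) = true
          ↔ (W ≤ k + 1 ∧ ∀ t ∈ target, t ∈ pvWinEnd jd W k) := by
        rw [Bool.and_eq_true, decide_eq_true_iff, beq_iff_eq, hA2, hwin]
        rw [show ((target.countP (fun t => decide (t ∈ pre'.drop (k+1-W))) : Int)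
              = (target.length : Int)) ↔
            (target.countP (fun t => decide (t ∈ pre'.drop (k+1-W))) = target.length)
          from Nat.cast_inj]
        rw [List.countP_eq_length]
        constructor
        · rintro ⟨_, h⟩
          exact ⟨by omega, fun t ht => of_decide_eq_true (h t ht)⟩
        · rintro ⟨_, h⟩
          exact ⟨by omega, fun t ht => decide_eq_true (h t ht)⟩
      by_cases hC : W ≤ k + 1 ∧ ∀ t ∈ target, t ∈ pvWinEnd jd W k
      · rw [if_pos (hcond.mpr hC)]
        simp only [true_iff]
        exact ⟨k, le_refl k, hklen, hC.1, hC.2⟩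
      · rw [if_neg (fun h => hC (hcond.mp h))]
        have henum : ((k:Int) + 1) = ((pre'.length : Nat) : Int) := by rw [hlenpre']; push_cast; ring
        rw [henum]
        rw [ih pre' (awEnter target counts haveC tok).1 (awEnter target counts haveC tok).2 hjd'
          (by intro t ht; rw [hlenpre']; exact hA1 t ht)
          (by rw [hlenpre']; exact hA2)]
        constructor
        · rintro ⟨k', h1, h2⟩
          exact ⟨k', by omega, h2⟩
        · rintro ⟨k', h1, h2, h3, h4⟩
          by_cases hek : k' = k
          · subst hek; exact absurd ⟨h3, h4⟩ hC
          · exact ⟨k', by omega, h2, h3, h4⟩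

-- ===== VERDICT (by name: the statement is the Claim_ definition above) =====
theorem all_words_within_window_py_spec : Claim_equal_all_words_within_window_py := by
  intro sn jd ws _
  unfold Spec_all_words_within_window_py
  simp only [all_words_within_window_py, all_words_within_window_py_alt]
  set words := ((PySem.Str.split? sn " ").getD []).filter (fun w => !(w == "")) with hwords
  by_cases h1 : (words.isEmpty || jd.isEmpty) = true
  · rw [if_pos h1, if_pos h1]
  · rw [if_neg h1, if_neg h1]
    by_cases h2 : (words.length == 1) = true
    · rw [if_pos h2, if_pos h2]
    · rw [if_neg h2, if_neg h2]
      -- facts about the sizes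
      have hwne : words ≠ [] := by
        intro h
        exact h1 (by simp [h])
      have hw2 : 2 ≤ words.length := by
        have : words.length ≠ 1 := by simpa using h2
        have : words.length ≠ 0 := by simpa [List.length_eq_zero_iff] using hwne
        omega
      have hjne : jd ≠ [] := by
        intro h
        exact h1 (by simp [h])
      have hjd1 : 1 ≤ jd.length := by
        have : jd.length ≠ 0 := by simpa [List.length_eq_zero_iff] using hjne
        omega
      set target := PySem.Set.ofList words with htarget
      have hnd : target.Nodup := PySem.Set.nodup_ofList words
      set span : Int := max ws (PySem.List.len words) with hspan
      have hlenw : PySem.List.len words = (words.length : Int) := PySem.List.len_eq words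
      have hlenj : PySem.List.len jd = (jd.length : Int) := PySem.List.len_eq jd
      have hspan1 : 1 ≤ span := by
        have := le_max_right ws (PySem.List.len words)
        rw [hlenw] at this
        omega
      set W : Nat := (min span (PySem.List.len jd)).toNat with hWdef
      have hwW : min span (PySem.List.len jd) = (W : Int) := by
        rw [hlenj] at hWdef ⊢
        omega
      have hW1 : 1 ≤ W := by rw [hlenj] at hWdef; omega
      have hWn : W ≤ jd.length := by rw [hlenj] at hWdef; omega
      have hneed : PySem.Set.len target = (target.length : Int) := PySem.List.len_eq target
      rw [Bool.eq_iff_iff]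
      rw [pv_anyA_iff jd target span hspan1]
      rw [hneed, hwW]
      have hinit := pv_awLoop_iff jd target hnd W hW1 jd [] PySem.Dict.empty 0
        (by simp) (by intro t _; simp) (by simp)
      simp only [List.length_nil, Nat.cast_zero] at hinit
      rw [hinit]
      simp only [Int.toNat_natCast]
      constructor
      · rintro ⟨k, hk, hWk, hcov⟩
        exact ⟨k, by omega, hk, by omega, hcov⟩
      · rintro ⟨k, _, hk, hWk, hcov⟩
        exact ⟨k, hk, by omega, hcov⟩
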